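-- pv_equiv track=rewrite | github.com/wclinton635/lobsterjess-autonomy-tools | autonomy-api-242.py | get_artifacts_summary
-- ===== SOURCE A (Python) =====
-- def get_artifacts_summary(sessions):
--     """Summarize all artifacts from sessions."""
--     artifact_types = {}
--
--     for session in sessions:
--         for artifact in session.get("artifacts", []):
--             # Categorize by type
--             if "voice" in artifact.lower() or ".mp3" in artifact.lower() or ".opus" in artifact.lower():
--                 artifact_types["voice"] = artifact_types.get("voice", 0) + 1
--             elif "html" in artifact.lower() or "page" in artifact.lower():
--                 artifact_types["webpage"] = artifact_types.get("webpage", 0) + 1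
--             elif "python" in artifact.lower() or ".py" in artifact.lower():
--                 artifact_types["script"] = artifact_types.get("script", 0) + 1
--             elif "rentry" in artifact.lower() or "external" in artifact.lower():
--                 artifact_types["external_post"] = artifact_types.get("external_post", 0) + 1
--             else:
--                 artifact_types["other"] = artifact_types.get("other", 0) + 1
--
--     return artifact_types
-- ===== SOURCE B (Python) =====
-- KEYWORDS = [
--     ("voice", "voice"), (".mp3", "voice"), (".opus", "voice"),
--     ("html", "webpage"), ("page", "webpage"),
--     ("python", "script"), (".py", "script"),
--     ("rentry", "external_post"), ("external", "external_post"),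
-- ]
--
--
-- def _category(artifact):
--     a = artifact.lower()
--     return next((cat for kw, cat in KEYWORDS if kw in a), "other")
--
--
-- def get_artifacts_summary(sessions):
--     """Summarize all artifacts from sessions."""
--     cats = [_category(a) for s in sessions for a in s.get("artifacts", [])]
--     summary = {}
--     for c in cats:
--         if c not in summary:
--             summary[c] = cats.count(c)
--     return summary
-- ===== Notes on version B (the rewrite author's own statement) =====
-- stated objective: alternative
-- what changed: Replaces A's single incremental pass (if/elif chain bumping a dict counter per artifact) with staged passes: first flatten all artifacts into a list of categories via a first-match flat keyword table, then build the summary by inserting each category once (first occurrence) with its total obtained from cats.count.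
import Mathlib
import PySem

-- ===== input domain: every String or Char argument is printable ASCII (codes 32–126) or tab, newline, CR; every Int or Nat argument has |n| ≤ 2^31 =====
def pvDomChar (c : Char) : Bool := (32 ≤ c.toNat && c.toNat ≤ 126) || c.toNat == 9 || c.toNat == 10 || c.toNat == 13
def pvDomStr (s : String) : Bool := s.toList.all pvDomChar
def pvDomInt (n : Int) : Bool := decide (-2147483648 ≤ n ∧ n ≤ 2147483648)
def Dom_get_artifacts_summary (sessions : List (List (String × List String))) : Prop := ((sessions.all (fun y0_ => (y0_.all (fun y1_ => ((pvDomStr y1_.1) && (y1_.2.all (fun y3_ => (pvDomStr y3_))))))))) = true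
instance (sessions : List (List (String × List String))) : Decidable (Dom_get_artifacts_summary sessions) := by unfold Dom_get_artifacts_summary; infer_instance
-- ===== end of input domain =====

-- B restructures A's single incremental counting pass into staged passes: flatten every artifact to a
-- category via a first-match flat keyword table, then build the summary by inserting each category at
-- its first occurrence with its total taken from cats.count (alternative decomposition, same results).
-- ===== PORT A =====
def get_artifacts_summary (sessions : List (List (String × List String))) : List (String × Int) :=
  (sessions.foldl (fun artifact_types session =>
    ((PySem.Dict.mk session).getD "artifacts" []).foldl (fun artifact_types artifact =>
      if PySem.Str.isIn "voice" (PySem.Str.lower artifact) || PySem.Str.isIn ".mp3" (PySem.Str.lower artifact) || PySem.Str.isIn ".opus" (PySem.Str.lower artifact) then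
        artifact_types.insert "voice" (artifact_types.getD "voice" 0 + 1)
      else if PySem.Str.isIn "html" (PySem.Str.lower artifact) || PySem.Str.isIn "page" (PySem.Str.lower artifact) then
        artifact_types.insert "webpage" (artifact_types.getD "webpage" 0 + 1)
      else if PySem.Str.isIn "python" (PySem.Str.lower artifact) || PySem.Str.isIn ".py" (PySem.Str.lower artifact) then
        artifact_types.insert "script" (artifact_types.getD "script" 0 + 1)
      else if PySem.Str.isIn "rentry" (PySem.Str.lower artifact) || PySem.Str.isIn "external" (PySem.Str.lower artifact) then
        artifact_types.insert "external_post" (artifact_types.getD "external_post" 0 + 1)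
      else
        artifact_types.insert "other" (artifact_types.getD "other" 0 + 1)) artifact_types)
    (PySem.Dict.empty : PySem.Dict String Int)).items

-- ===== PORT B =====
def pvKeywords : List (String × String) :=
  [("voice", "voice"), (".mp3", "voice"), (".opus", "voice"),
   ("html", "webpage"), ("page", "webpage"),
   ("python", "script"), (".py", "script"),
   ("rentry", "external_post"), ("external", "external_post")]

-- next((cat for kw, cat in KEYWORDS if kw in a), "other")
def pvCategory (artifact : String) : String :=
  let a := PySem.Str.lower artifact
  (((pvKeywords.find? (fun p => PySem.Str.isIn p.1 a)).map (·.2)).getD "other")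

def get_artifacts_summary_alt (sessions : List (List (String × List String))) : List (String × Int) :=
  let cats := sessions.flatMap (fun s => ((PySem.Dict.mk s).getD "artifacts" []).map pvCategory)
  (cats.foldl (fun summary c =>
      if summary.contains c then summary
      else summary.insert c ((cats.count c : Int)))
    (PySem.Dict.empty : PySem.Dict String Int)).items

-- ===== PRECONDITION & SPEC =====
def Spec_get_artifacts_summary (sessions : List (List (String × List String))) (out : List (String × Int)) : Prop := out = get_artifacts_summary_alt sessions
instance (sessions : List (List (String × List String))) (out : List (String × Int)) : Decidable (Spec_get_artifacts_summary sessions out) := by unfold Spec_get_artifacts_summary; infer_instance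

-- ===== CLAIM (what is proved, stated in full; the proofs are below) =====
def Claim_equal_get_artifacts_summary : Prop := ∀ (sessions : List (List (String × List String))), Dom_get_artifacts_summary sessions → Spec_get_artifacts_summary sessions (get_artifacts_summary sessions)

-- ===== LEMMAS AND PROOFS =====

-- a nested fold over the rows of a flatMap is the fold over the flatMap
lemma foldl_flatMap' {α β γ : Type} (l : List α) (f : α → List β) (g : γ → β → γ) (i : γ) :
    (l.flatMap f).foldl g i = l.foldl (fun d s => (f s).foldl g d) i := by
  induction l generalizing i with
  | nil => rfl
  | cons s t ih => simp only [List.flatMap_cons, List.foldl_append, List.foldl_cons]; exact ih _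

-- A's if/elif chain, as a category-valued function
def pvChainCat (artifact : String) : String :=
  if PySem.Str.isIn "voice" (PySem.Str.lower artifact) || PySem.Str.isIn ".mp3" (PySem.Str.lower artifact) || PySem.Str.isIn ".opus" (PySem.Str.lower artifact) then "voice"
  else if PySem.Str.isIn "html" (PySem.Str.lower artifact) || PySem.Str.isIn "page" (PySem.Str.lower artifact) then "webpage"
  else if PySem.Str.isIn "python" (PySem.Str.lower artifact) || PySem.Str.isIn ".py" (PySem.Str.lower artifact) then "script"
  else if PySem.Str.isIn "rentry" (PySem.Str.lower artifact) || PySem.Str.isIn "external" (PySem.Str.lower artifact) then "external_post"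
  else "other"

-- B's first-match flat keyword scan picks the same category as A's grouped chain
lemma pvCategory_eq (artifact : String) : pvCategory artifact = pvChainCat artifact := by
  simp only [pvCategory, pvChainCat, pvKeywords, List.find?]
  split_ifs <;> simp_all <;> rename_i h <;>
    first
      | (rcases h with (h | h) | h <;> simp [h] <;> (repeat' split) <;> simp)
      | (rcases h with h | h <;> simp [h] <;> (repeat' split) <;> simp)

-- A's loop body increments the counter of the chain category
lemma step_eq :
    (fun (d : PySem.Dict String Int) (artifact : String) =>
      if PySem.Str.isIn "voice" (PySem.Str.lower artifact) || PySem.Str.isIn ".mp3" (PySem.Str.lower artifact) || PySem.Str.isIn ".opus" (PySem.Str.lower artifact) then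
        d.insert "voice" (d.getD "voice" 0 + 1)
      else if PySem.Str.isIn "html" (PySem.Str.lower artifact) || PySem.Str.isIn "page" (PySem.Str.lower artifact) then
        d.insert "webpage" (d.getD "webpage" 0 + 1)
      else if PySem.Str.isIn "python" (PySem.Str.lower artifact) || PySem.Str.isIn ".py" (PySem.Str.lower artifact) then
        d.insert "script" (d.getD "script" 0 + 1)
      else if PySem.Str.isIn "rentry" (PySem.Str.lower artifact) || PySem.Str.isIn "external" (PySem.Str.lower artifact) then
        d.insert "external_post" (d.getD "external_post" 0 + 1)
      else
        d.insert "other" (d.getD "other" 0 + 1))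
    = (fun (d : PySem.Dict String Int) (artifact : String) =>
        d.insert (pvCategory artifact) (d.getD (pvCategory artifact) 0 + 1)) := by
  funext d artifact
  rw [pvCategory_eq]
  unfold pvChainCat
  split_ifs <;> rfl

-- B's second loop: first-occurrence keys (not yet in d), values taken from the fixed list L
lemma b_fold (L : List String) : ∀ (l : List String) (d : PySem.Dict String Int),
    (l.foldl (fun summary c =>
        if summary.contains c then summary
        else summary.insert c ((L.count c : Int))) d).items
      = d.items ++ ((PySem.Set.ofList l).filter (fun c => !(d.contains c))).map
          (fun c => (c, (L.count c : Int))) := by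
  intro l
  induction l with
  | nil => simp
  | cons c cs ih =>
    intro d
    simp only [List.foldl_cons]
    by_cases h : d.contains c = true
    · rw [if_pos h, ih d, PySem.Set.ofList_cons, PySem.Set.discard]
      simp only [List.filter_cons, List.filter_filter, h, Bool.not_true, Bool.false_eq_true,
        if_false]
      congr 2
      apply List.filter_congr
      intro x _
      by_cases hx : x = c
      · simp [hx, h]
      · simp [hx]
    · simp only [Bool.not_eq_true] at h
      rw [if_neg (by simp [h]), ih, PySem.Dict.items_insert_of_not_contains _ _ h,
        PySem.Set.ofList_cons, PySem.Set.discard]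
      simp only [List.filter_cons, List.filter_filter, h, Bool.not_false, if_true,
        List.append_assoc, List.cons_append, List.nil_append]
      congr 3
      apply List.filter_congr
      intro x _
      rw [PySem.Dict.contains_insert]
      by_cases hx : x = c
      · simp [hx]
      · simp [Bool.and_comm]

-- ===== VERDICT (by name: the statement is the Claim_ definition above) =====
theorem get_artifacts_summary_spec : Claim_equal_get_artifacts_summary := by
  intro sessions _
  unfold Spec_get_artifacts_summary get_artifacts_summary get_artifacts_summary_alt
  rw [step_eq, ← foldl_flatMap']
  have hcats : sessions.flatMap (fun s => ((PySem.Dict.mk s).getD "artifacts" []).map pvCategory)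
      = (sessions.flatMap (fun s => (PySem.Dict.mk s).getD "artifacts" [])).map pvCategory := by
    rw [List.map_flatMap]
  rw [hcats, b_fold]
  rw [show (List.foldl (fun (d : PySem.Dict String Int) artifact => d.insert (pvCategory artifact) (d.getD (pvCategory artifact) 0 + 1)) PySem.Dict.empty
      (List.flatMap (fun session => (PySem.Dict.mk session).getD "artifacts" []) sessions))
    = (List.foldl (fun (d : PySem.Dict String Int) c => d.insert c (d.getD c 0 + 1)) PySem.Dict.empty
      ((List.flatMap (fun session => (PySem.Dict.mk session).getD "artifacts" []) sessions).map pvCategory))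
    from (List.foldl_map (f := pvCategory) (g := fun (d : PySem.Dict String Int) c => d.insert c (d.getD c 0 + 1))).symm]
  rw [PySem.Dict.foldl_insert_getD_add_one_eq_counter, PySem.Dict.items_counter]
  simp [PySem.Dict.contains_empty]
  rfl
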